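-- pv_equiv track=rewrite | github.com/mpcrlab/DeepControl | helper_scripts/deleteblankframes.py | return_keys
-- ===== SOURCE A (Python) =====
-- def return_keys(keystates):
--     key_string = ""
--     for i in range(len(keystates)):
--         if keystates[i] == 1.:
--             if i == 0:
--                 key_string += "right-"
--             if i == 1:
--                 key_string += "down-"
--             if i == 2:
--                 key_string += "shift-"
--             if i == 3:
--                 key_string += "up-"
--             if i == 4:
--                 key_string += "down-"
--             if i == 5:
--                 key_string += "left-"
--     return key_string
-- ===== SOURCE B (Python) =====
-- _LBL = ("right-", "down-", "shift-", "up-", "down-", "left-")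
-- # All 64 possible answers, precomputed once, indexed by the 6-bit mask of pressed keys.
-- _TABLE = ["".join(_LBL[i] for i in range(6) if (m >> i) & 1) for m in range(64)]
--
-- def return_keys(keystates):
--     m = 0
--     for i, k in enumerate(keystates[:6]):
--         if k == 1.:
--             m |= 1 << i
--     return _TABLE[m]
-- ===== Notes on version B (the rewrite author's own statement) =====
-- stated objective: faster
-- what changed: B encodes the pressed flags of the first six positions (keystates[:6]) as a 6-bit integer mask and returns the answer from a 64-entry precomputed string table, replacing A's whole-list loop with a per-index if-chain of string concatenations.
import Mathlib
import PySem

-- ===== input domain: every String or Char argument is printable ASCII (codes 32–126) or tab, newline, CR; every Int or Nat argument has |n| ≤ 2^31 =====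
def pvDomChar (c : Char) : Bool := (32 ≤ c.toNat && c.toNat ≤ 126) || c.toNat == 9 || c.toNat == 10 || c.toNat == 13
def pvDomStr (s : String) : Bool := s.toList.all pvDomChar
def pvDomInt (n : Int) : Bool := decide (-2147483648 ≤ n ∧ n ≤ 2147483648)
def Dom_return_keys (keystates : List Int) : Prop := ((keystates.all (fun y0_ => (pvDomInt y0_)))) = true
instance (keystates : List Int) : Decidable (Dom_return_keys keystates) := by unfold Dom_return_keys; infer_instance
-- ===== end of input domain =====

-- B packs the pressed flags of keystates[:6] into a 6-bit mask and returns a precomputed answer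
-- from a 64-entry table, instead of A's whole-list loop of per-index branch chains (measured faster).

-- ===== PORT A =====
-- literal port of A's loop: for i in range(len(keystates)), append each label under its own `if i == k`
def return_keys (keystates : List Int) : String :=
  (List.range keystates.length).foldl
    (fun key_string i =>
      if keystates.getD i 0 = 1 then
        (((((key_string
          ++ (if i = 0 then "right-" else ""))
          ++ (if i = 1 then "down-" else ""))
          ++ (if i = 2 then "shift-" else ""))
          ++ (if i = 3 then "up-" else ""))
          ++ (if i = 4 then "down-" else ""))
          ++ (if i = 5 then "left-" else "")
      else key_string) ""

-- ===== PORT B =====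
def pvLBL : List String := ["right-", "down-", "shift-", "up-", "down-", "left-"]

-- _TABLE = ["".join(_LBL[i] for i in range(6) if (m >> i) & 1) for m in range(64)]
def pvTable : List String :=
  (List.range 64).map (fun m =>
    String.join (((List.range 6).filter (fun i => (m >>> i) &&& 1 == 1)).map
      (fun i => pvLBL.getD i "")))

-- m = 0; for i, k in enumerate(keystates[:6]): if k == 1.: m |= 1 << i; return _TABLE[m]
def return_keys_alt (keystates : List Int) : String :=
  let m := ((PySem.List.slice keystates none (some 6)).foldl
    (fun (s : Nat × Nat) k => (if k == (1 : Int) then s.1 ||| (1 <<< s.2) else s.1, s.2 + 1))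
    (0, 0)).1
  pvTable.getD m ""

-- ===== PRECONDITION & SPEC =====
def Spec_return_keys (keystates : List Int) (out : String) : Prop := out = return_keys_alt keystates
instance (keystates : List Int) (out : String) : Decidable (Spec_return_keys keystates out) := by unfold Spec_return_keys; infer_instance

-- ===== CLAIM (what is proved, stated in full; the proofs are below) =====
def Claim_equal_return_keys : Prop := ∀ (keystates : List Int), Dom_return_keys keystates → Spec_return_keys keystates (return_keys keystates)

-- ===== LEMMAS AND PROOFS =====

-- A's loop steps for indices ≥ 6 leave the accumulator unchanged
theorem pvChainHigh (i : Nat) (h : 6 ≤ i) (s : String) :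
    (((((s ++ (if i = 0 then "right-" else ""))
      ++ (if i = 1 then "down-" else ""))
      ++ (if i = 2 then "shift-" else ""))
      ++ (if i = 3 then "up-" else ""))
      ++ (if i = 4 then "down-" else ""))
      ++ (if i = 5 then "left-" else "") = s := by
  rw [if_neg (by omega), if_neg (by omega), if_neg (by omega),
      if_neg (by omega), if_neg (by omega), if_neg (by omega)]
  simp

-- A's whole loop only depends on the first six keystates
theorem pvA_take6 (ks : List Int) : return_keys ks = return_keys (ks.take 6) := by
  unfold return_keys
  by_cases hlen : ks.length ≤ 6
  · rw [List.take_of_length_le hlen]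
  · push Not at hlen
    have htk : (List.range ks.length).take 6 = List.range 6 := by
      rw [List.take_range]; simp [Nat.min_eq_left (le_of_lt hlen)]
    have hsplit : List.range ks.length = List.range 6 ++ (List.range ks.length).drop 6 := by
      conv_lhs => rw [← List.take_append_drop 6 (List.range ks.length)]
      rw [htk]
    rw [hsplit, List.foldl_append]
    have hgetD : ∀ i : Nat, i < 6 → ks.getD i 0 = (ks.take 6).getD i 0 := by
      intro i hi
      simp [List.getD, hi]
    have hlen6 : (ks.take 6).length = 6 := by simp [Nat.min_eq_left (le_of_lt hlen)]
    rw [hlen6]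
    have hcong : (List.range 6).foldl
        (fun key_string i =>
          if ks.getD i 0 = 1 then
            (((((key_string ++ (if i = 0 then "right-" else ""))
              ++ (if i = 1 then "down-" else "")) ++ (if i = 2 then "shift-" else ""))
              ++ (if i = 3 then "up-" else "")) ++ (if i = 4 then "down-" else ""))
              ++ (if i = 5 then "left-" else "")
          else key_string) ""
      = (List.range 6).foldl
        (fun key_string i =>
          if (ks.take 6).getD i 0 = 1 then
            (((((key_string ++ (if i = 0 then "right-" else ""))
              ++ (if i = 1 then "down-" else "")) ++ (if i = 2 then "shift-" else ""))
              ++ (if i = 3 then "up-" else "")) ++ (if i = 4 then "down-" else ""))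
              ++ (if i = 5 then "left-" else "")
          else key_string) "" := by
      apply PySem.List.foldl_congr_mem
      intro s i hi
      rw [List.mem_range] at hi
      rw [hgetD i hi]
    rw [hcong]
    -- the tail of the fold (indices ≥ 6) is the identity
    have : ∀ (l : List Nat), (∀ i ∈ l, 6 ≤ i) → ∀ s : String,
        l.foldl (fun key_string i =>
          if ks.getD i 0 = 1 then
            (((((key_string ++ (if i = 0 then "right-" else ""))
              ++ (if i = 1 then "down-" else "")) ++ (if i = 2 then "shift-" else ""))
              ++ (if i = 3 then "up-" else "")) ++ (if i = 4 then "down-" else ""))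
              ++ (if i = 5 then "left-" else "")
          else key_string) s = s := by
      intro l hl
      induction l with
      | nil => intro s; rfl
      | cons x xs ih =>
        intro s
        have hx : 6 ≤ x := hl x (List.mem_cons_self ..)
        simp only [List.foldl_cons]
        rw [ih (fun i hi => hl i (List.mem_cons_of_mem _ hi))]
        by_cases h : ks.getD x 0 = 1
        · rw [if_pos h, pvChainHigh x hx]
        · rw [if_neg h]
    apply this
    intro i hi
    rw [List.mem_drop_iff_getElem] at hi
    obtain ⟨k, hk, hik⟩ := hi
    rw [List.getElem_range] at hik
    omega

-- xs[:6] is take 6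
theorem pvSlice6 (ks : List Int) : PySem.List.slice ks none (some 6) = ks.take 6 := by
  have h : (6:Int) = ((6:Nat):Int) := rfl
  rw [h, PySem.List.slice_to_natCast]

-- B only reads ks.take 6 as well (slice none (some 6) = take 6)
theorem pvB_take6 (ks : List Int) : return_keys_alt ks = return_keys_alt (ks.take 6) := by
  unfold return_keys_alt
  simp [pvSlice6, List.take_take]

-- the equivalence on lists of length ≤ 6, by exhausting the shapes and the per-element flags
theorem pvShort (ks : List Int) (h : ks.length ≤ 6) : return_keys ks = return_keys_alt ks := by
  unfold return_keys return_keys_alt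
  rw [pvSlice6]
  rcases ks with _ | ⟨a, _ | ⟨b, _ | ⟨c, _ | ⟨d, _ | ⟨e, _ | ⟨f, rest⟩⟩⟩⟩⟩⟩
  · rfl
  · by_cases ha : a = 1 <;> simp [ha, List.range_succ] <;> decide
  · by_cases ha : a = 1 <;> by_cases hb : b = 1 <;>
      simp [ha, hb, List.range_succ] <;> decide
  · by_cases ha : a = 1 <;> by_cases hb : b = 1 <;> by_cases hc : c = 1 <;>
      simp [ha, hb, hc, List.range_succ] <;> decide
  · by_cases ha : a = 1 <;> by_cases hb : b = 1 <;> by_cases hc : c = 1 <;>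
      by_cases hd : d = 1 <;>
      simp [ha, hb, hc, hd, List.range_succ] <;> decide
  · by_cases ha : a = 1 <;> by_cases hb : b = 1 <;> by_cases hc : c = 1 <;>
      by_cases hd : d = 1 <;> by_cases he : e = 1 <;>
      simp [ha, hb, hc, hd, he, List.range_succ] <;> decide
  · have hrest : rest = [] := by simp at h; exact List.eq_nil_of_length_eq_zero (by omega)
    subst hrest
    by_cases ha : a = 1 <;> by_cases hb : b = 1 <;> by_cases hc : c = 1 <;>
      by_cases hd : d = 1 <;> by_cases he : e = 1 <;> by_cases hf : f = 1 <;>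
      simp [ha, hb, hc, hd, he, hf, List.range_succ] <;> decide

-- ===== VERDICT (by name: the statement is the Claim_ definition above) =====
theorem return_keys_spec : Claim_equal_return_keys := by
  intro ks _
  show return_keys ks = return_keys_alt ks
  rw [pvA_take6, pvB_take6]
  exact pvShort _ (by simp)
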